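-- pv_equiv track=rewrite | github.com/ronyut/bisli | pyan-master/Transcript.py | repl_symbols
-- ===== SOURCE A (Python) =====
-- REPLACE_SYMBOLS =  {'ç': 'c', '"': "'", "-": " "}
--
-- REMOVE_SYMBOLS_RUS = "_*.,`?()"
--
-- REMOVE_SYMBOLS_HEB = REMOVE_SYMBOLS_RUS + "'"
--
-- def repl_symbols(string, lang):
--     if lang == "hebrew":
--         remove_symbols = REMOVE_SYMBOLS_HEB
--     elif lang == "russian":
--         remove_symbols = REMOVE_SYMBOLS_RUS
--
--     for a, b in REPLACE_SYMBOLS.items():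
--         string = string.replace(a, b)
--     for a in remove_symbols:
--         string = string.replace(a, '')
--     return string
-- ===== SOURCE B (Python) =====
-- REPLACE_SYMBOLS =  {'ç': 'c', '"': "'", "-": " "}
--
-- REMOVE_SYMBOLS_RUS = "_*.,`?()"
--
-- REMOVE_SYMBOLS_HEB = REMOVE_SYMBOLS_RUS + "'"
--
-- # Per-language translation table applied in ONE pass with str.translate,
-- # instead of A's 11-12 successive full-string .replace passes.
-- _TABLE_HEB = str.maketrans(
--     {'ç': 'c', '-': ' ',
--      # A rewrites '"' to "'" and Hebrew then deletes "'", so both are deleted here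
--      '"': None, "'": None,
--      '_': None, '*': None, '.': None, ',': None,
--      '`': None, '?': None, '(': None, ')': None})
--
-- _TABLE_RUS = str.maketrans(
--     {'ç': 'c', '-': ' ', '"': "'",
--      '_': None, '*': None, '.': None, ',': None,
--      '`': None, '?': None, '(': None, ')': None})
--
-- def repl_symbols(string, lang):
--     if lang == "hebrew":
--         table = _TABLE_HEB
--     elif lang == "russian":
--         table = _TABLE_RUS
--     return string.translate(table)
-- ===== Notes on version B (the rewrite author's own statement) =====
-- stated objective: idiomatic
-- what changed: Replaces A's 11-12 successive full-string str.replace passes with one per-language translation table (str.maketrans) applied in a single str.translate pass, folding the '"'->'\''->deleted chain into the Hebrew table.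
import Mathlib
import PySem

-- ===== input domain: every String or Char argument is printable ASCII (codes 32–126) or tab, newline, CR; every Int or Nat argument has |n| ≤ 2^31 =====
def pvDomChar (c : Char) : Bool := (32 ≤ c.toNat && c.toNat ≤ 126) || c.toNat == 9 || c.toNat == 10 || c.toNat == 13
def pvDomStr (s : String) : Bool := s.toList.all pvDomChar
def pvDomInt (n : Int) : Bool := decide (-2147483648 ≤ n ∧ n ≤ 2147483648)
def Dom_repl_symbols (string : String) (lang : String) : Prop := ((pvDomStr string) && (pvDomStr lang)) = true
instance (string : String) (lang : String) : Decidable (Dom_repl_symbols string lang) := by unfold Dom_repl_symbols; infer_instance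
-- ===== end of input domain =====

-- B builds a per-language char→Option Char translation table and applies it in ONE pass
-- (Python str.translate), instead of A's successive full-string replace passes (objective: idiomatic).

-- ===== PORT A =====
def pvReplacePairs : List (Char × String) := [('ç', "c"), ('"', "'"), ('-', " ")]

def pvRemoveRus : String := "_*.,`?()"

def pvRemoveHeb : String := pvRemoveRus ++ "'"

def repl_symbols (string : String) (lang : String) : String :=
  -- A raises UnboundLocalError for any other lang; those inputs are outside Pre_
  let remove_symbols := if lang == "hebrew" then pvRemoveHeb else pvRemoveRus
  let s1 := pvReplacePairs.foldl (fun s ab => PySem.Str.replace s (String.ofList [ab.1]) ab.2) string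
  remove_symbols.toList.foldl (fun s a => PySem.Str.replace s (String.ofList [a]) "") s1

-- ===== PORT B =====
-- str.maketrans table for Hebrew: '"' and "'" are both deleted (A's '"'→"'" then delete "'")
def pvTableHeb (c : Char) : Option Char :=
  if c = 'ç' then some 'c'
  else if c = '-' then some ' '
  else if c = '"' ∨ c = '\'' ∨ c = '_' ∨ c = '*' ∨ c = '.' ∨ c = ',' ∨ c = '`' ∨ c = '?' ∨ c = '(' ∨ c = ')' then none
  else some c

-- str.maketrans table for Russian: '"' becomes "'"
def pvTableRus (c : Char) : Option Char :=
  if c = 'ç' then some 'c'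
  else if c = '-' then some ' '
  else if c = '"' then some '\''
  else if c = '_' ∨ c = '*' ∨ c = '.' ∨ c = ',' ∨ c = '`' ∨ c = '?' ∨ c = '(' ∨ c = ')' then none
  else some c

def repl_symbols_alt (string : String) (lang : String) : String :=
  -- same if/elif as B's Python; unknown lang raises there, outside Pre_
  let table := if lang == "hebrew" then pvTableHeb else pvTableRus
  String.ofList (string.toList.filterMap table)  -- str.translate: one pass over the string

-- ===== PRECONDITION & SPEC =====
-- A raises UnboundLocalError whenever lang is neither "hebrew" nor "russian": those inputs are excluded.
def Pre_repl_symbols (string : String) (lang : String) : Prop :=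
  lang = "hebrew" ∨ lang = "russian"
instance (string : String) (lang : String) : Decidable (Pre_repl_symbols string lang) := by unfold Pre_repl_symbols; infer_instance

def pvWitness_repl_symbols : String × String := ("ab\"c-d_e'", "hebrew")

def Spec_repl_symbols (string : String) (lang : String) (out : String) : Prop := out = repl_symbols_alt string lang
instance (string : String) (lang : String) (out : String) : Decidable (Spec_repl_symbols string lang out) := by unfold Spec_repl_symbols; infer_instance

-- ===== CLAIM (what is proved, stated in full; the proofs are below) =====
def Claim_equal_repl_symbols : Prop := ∀ (string : String) (lang : String), Dom_repl_symbols string lang → Pre_repl_symbols string lang → Spec_repl_symbols string lang (repl_symbols string lang)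

-- ===== LEMMAS AND PROOFS =====

-- one replace pass with a single-char pattern is a flatMap over the characters
theorem pvReplace_single (a : Char) (bs : List Char) :
    ∀ (l acc : List Char),
      PySem.Chars.replace.go [a] bs l.length l acc
        = acc.reverse ++ l.flatMap (fun c => if c = a then bs else [c]) := by
  intro l
  induction l with
  | nil => intro acc; simp [PySem.Chars.replace.go]
  | cons c t ih =>
      intro acc
      rw [show (c :: t).length = t.length + 1 from rfl]
      rw [PySem.Chars.replace.go]
      by_cases h : c = a
      · subst h
        simp only [List.isPrefixOf, BEq.rfl, Bool.and_eq_true]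
        rw [show List.drop [c].length (c :: t) = t from rfl, ih]
        simp
      · have hp : [a].isPrefixOf (c :: t) = false := by
          simp [List.isPrefixOf]
          exact fun hh => absurd hh.symm h
        rw [hp]
        simp only [Bool.false_eq_true, if_false, ih]
        simp [h]

theorem pvReplace_single' (cs : List Char) (a : Char) (bs : List Char) :
    PySem.Chars.replace cs [a] bs = cs.flatMap (fun c => if c = a then bs else [c]) := by
  rw [PySem.Chars.replace]
  simp [pvReplace_single]

theorem pvFlatMap_eq_filterMap (g : Char → Option Char) (f : Char → List Char)
    (h : ∀ c, f c = (g c).toList) (cs : List Char) :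
    cs.flatMap f = cs.filterMap g := by
  induction cs with
  | nil => simp
  | cons c t ih =>
      rw [List.flatMap_cons, List.filterMap_cons, ih, h c]
      cases g c <;> simp

-- the Hebrew chain of A, applied to one character
def pvChainHeb (c : Char) : List Char :=
  ((((((((((((if c = 'ç' then ['c'] else [c]).flatMap
    (fun d => if d = '"' then ['\''] else [d])).flatMap
    (fun d => if d = '-' then [' '] else [d])).flatMap
    (fun d => if d = '_' then [] else [d])).flatMap
    (fun d => if d = '*' then [] else [d])).flatMap
    (fun d => if d = '.' then [] else [d])).flatMap
    (fun d => if d = ',' then [] else [d])).flatMap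
    (fun d => if d = '`' then [] else [d])).flatMap
    (fun d => if d = '?' then [] else [d])).flatMap
    (fun d => if d = '(' then [] else [d])).flatMap
    (fun d => if d = ')' then [] else [d])).flatMap
    (fun d => if d = '\'' then [] else [d]))

-- the Russian chain of A, applied to one character
def pvChainRus (c : Char) : List Char :=
  (((((((((((if c = 'ç' then ['c'] else [c]).flatMap
    (fun d => if d = '"' then ['\''] else [d])).flatMap
    (fun d => if d = '-' then [' '] else [d])).flatMap
    (fun d => if d = '_' then [] else [d])).flatMap
    (fun d => if d = '*' then [] else [d])).flatMap
    (fun d => if d = '.' then [] else [d])).flatMap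
    (fun d => if d = ',' then [] else [d])).flatMap
    (fun d => if d = '`' then [] else [d])).flatMap
    (fun d => if d = '?' then [] else [d])).flatMap
    (fun d => if d = '(' then [] else [d])).flatMap
    (fun d => if d = ')' then [] else [d]))

theorem pvChainHeb_eq (c : Char) : pvChainHeb c = (pvTableHeb c).toList := by
  by_cases h : c ∈ ['ç', '"', '-', '_', '*', '.', ',', '`', '?', '(', ')', '\''] 
  · simp only [List.mem_cons, List.not_mem_nil, or_false] at h
    rcases h with h|h|h|h|h|h|h|h|h|h|h|h <;> subst h <;> decide
  · simp only [List.mem_cons, List.not_mem_nil, or_false, not_or] at h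
    obtain ⟨n1,n2,n3,n4,n5,n6,n7,n8,n9,n10,n11,n12⟩ := h
    simp [pvChainHeb, pvTableHeb, n1,n2,n3,n4,n5,n6,n7,n8,n9,n10,n11,n12]

theorem pvChainRus_eq (c : Char) : pvChainRus c = (pvTableRus c).toList := by
  by_cases h : c ∈ ['ç', '"', '-', '_', '*', '.', ',', '`', '?', '(', ')']
  · simp only [List.mem_cons, List.not_mem_nil, or_false] at h
    rcases h with h|h|h|h|h|h|h|h|h|h|h <;> subst h <;> decide
  · simp only [List.mem_cons, List.not_mem_nil, or_false, not_or] at h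
    obtain ⟨n1,n2,n3,n4,n5,n6,n7,n8,n9,n10,n11⟩ := h
    simp [pvChainRus, pvTableRus, n1,n2,n3,n4,n5,n6,n7,n8,n9,n10,n11]

theorem repl_heb (s : String) :
    repl_symbols s "hebrew" = repl_symbols_alt s "hebrew" := by
  simp only [repl_symbols, repl_symbols_alt, pvReplacePairs, pvRemoveHeb, pvRemoveRus]
  rw [show (if ("hebrew" == "hebrew") = true then ("_*.,`?()" : String) ++ "'" else "_*.,`?()") = ("_*.,`?()" ++ "'" : String) from rfl]
  rw [show (if ("hebrew" == "hebrew") = true then pvTableHeb else pvTableRus) = pvTableHeb from rfl]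
  rw [show (("_*.,`?()" : String) ++ "'").toList = ['_','*','.',',','`','?','(',')','\''] from rfl]
  simp only [List.foldl_cons, List.foldl_nil]
  have hmk : ∀ (t : String) (a : Char) (b : String),
      PySem.Str.replace t (String.ofList [a]) b
        = String.ofList (PySem.Chars.replace t.toList [a] b.toList) := by
    intro t a b; simp [PySem.Str.replace]
  -- move the whole chain to the character-list level
  simp only [hmk, String.toList_ofList]
  rw [show ("c" : String).toList = ['c'] from rfl, show ("'" : String).toList = ['\''] from rfl,
      show (" " : String).toList = [' '] from rfl, show ("" : String).toList = [] from rfl]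
  simp only [pvReplace_single', List.flatMap_assoc]
  congr 1
  refine pvFlatMap_eq_filterMap pvTableHeb _ (fun c => ?_) s.toList
  rw [← pvChainHeb_eq c]
  simp [pvChainHeb, List.flatMap_assoc]

theorem repl_rus (s : String) :
    repl_symbols s "russian" = repl_symbols_alt s "russian" := by
  simp only [repl_symbols, repl_symbols_alt, pvReplacePairs, pvRemoveHeb, pvRemoveRus]
  rw [show (if ("russian" == "hebrew") = true then ("_*.,`?()" : String) ++ "'" else "_*.,`?()") = ("_*.,`?()" : String) from rfl]
  rw [show (if ("russian" == "hebrew") = true then pvTableHeb else pvTableRus) = pvTableRus from rfl]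
  rw [show ("_*.,`?()" : String).toList = ['_','*','.',',','`','?','(',')'] from rfl]
  simp only [List.foldl_cons, List.foldl_nil]
  have hmk : ∀ (t : String) (a : Char) (b : String),
      PySem.Str.replace t (String.ofList [a]) b
        = String.ofList (PySem.Chars.replace t.toList [a] b.toList) := by
    intro t a b; simp [PySem.Str.replace]
  simp only [hmk, String.toList_ofList]
  rw [show ("c" : String).toList = ['c'] from rfl, show ("'" : String).toList = ['\''] from rfl,
      show (" " : String).toList = [' '] from rfl, show ("" : String).toList = [] from rfl]
  simp only [pvReplace_single', List.flatMap_assoc]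
  congr 1
  refine pvFlatMap_eq_filterMap pvTableRus _ (fun c => ?_) s.toList
  rw [← pvChainRus_eq c]
  simp [pvChainRus, List.flatMap_assoc]

-- ===== VERDICT (by name: the statement is the Claim_ definition above) =====
theorem repl_symbols_spec : Claim_equal_repl_symbols := by
  intro s lang _ hpre
  unfold Spec_repl_symbols
  rcases hpre with h | h <;> subst h
  · exact repl_heb s
  · exact repl_rus s
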